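-- pv_equiv track=rewrite | github.com/RamananVr/Leetcodepython | arrays/2684_maximum_number_of_moves_in_a_grid.py | maxMovesOptimizedDP
-- ===== SOURCE A (Python) =====
-- from typing import List
--
-- def maxMovesOptimizedDP(grid: List[List[int]]) -> int:
--     """
--     Space-optimized DP using only two columns.
--
--     Time Complexity: O(m * n)
--     Space Complexity: O(m)
--     """
--     m, n = len(grid), len(grid[0])
--
--     # Only need current and next column
--     prev_col = [0] * m
--     curr_col = [0] * m
--
--     # Process from right to left
--     for col in range(n - 2, -1, -1):
--         for row in range(m):
--             curr_col[row] = 0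
--             current_val = grid[row][col]
--
--             # Check all three possible moves
--             for next_row in [row - 1, row, row + 1]:
--                 if (0 <= next_row < m and
--                     grid[next_row][col + 1] > current_val):
--                     curr_col[row] = max(curr_col[row], 1 + prev_col[next_row])
--
--         # Swap columns
--         prev_col, curr_col = curr_col, prev_col
--
--     return max(prev_col)
-- ===== SOURCE B (Python) =====
-- from typing import List
--
-- def maxMovesOptimizedDP(grid: List[List[int]]) -> int:
--     m, n = len(grid), len(grid[0])
--     cols = [[row[c] for row in grid] for c in range(n)]
--
--     def solve(cs):
--         if len(cs) <= 1:
--             return [0] * m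
--         rest = solve(cs[1:])
--         cur, nxt = cs[0], cs[1]
--         return [max([1 + rest[j] for j in (i - 1, i, i + 1)
--                      if 0 <= j < m and nxt[j] > cur[i]], default=0)
--                 for i in range(m)]
--
--     return max(solve(cols))
-- ===== Notes on version B (the rewrite author's own statement) =====
-- stated objective: alternative
-- what changed: A does an index-based reverse sweep mutating two rolled column arrays; B transposes the grid into a list of columns and computes the same DP by structural recursion over that column list; Pre_ excludes the empty grid (both raise) and ragged grids, where A's lazy indexing may still return (e.g. with a single column it touches no row) while B's eager transpose raises.
-- outside the precondition, e.g. on maxMovesOptimizedDP([[0], [], [2, 10, 2]]): A returns 0, B raises IndexError; on maxMovesOptimizedDP([]): A raises IndexError, B raises IndexError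
import Mathlib
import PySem

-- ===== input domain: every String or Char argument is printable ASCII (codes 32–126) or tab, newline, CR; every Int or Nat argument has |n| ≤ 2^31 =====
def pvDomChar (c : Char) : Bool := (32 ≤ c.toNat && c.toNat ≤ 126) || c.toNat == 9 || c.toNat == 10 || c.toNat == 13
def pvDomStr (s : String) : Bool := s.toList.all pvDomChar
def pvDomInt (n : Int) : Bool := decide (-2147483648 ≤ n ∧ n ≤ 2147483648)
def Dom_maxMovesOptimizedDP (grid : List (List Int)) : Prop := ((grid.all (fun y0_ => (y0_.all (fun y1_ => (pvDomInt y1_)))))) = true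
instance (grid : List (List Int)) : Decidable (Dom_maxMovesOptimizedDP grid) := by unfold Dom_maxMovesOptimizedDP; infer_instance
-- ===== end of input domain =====

-- B replaces A's index-based reverse sweep over two rolled column arrays by a
-- structural recursion over the transposed column list (alternative decomposition, same cost).


-- ===== PORT A =====
-- one iteration of A's outer loop: recompute curr_col from prev_col at column `col`
def pvAStep (grid : List (List Int)) (m : Nat) (prev : List Int) (col : Int) : List Int :=
  (List.range m).map (fun (row : Nat) =>
    let currentVal := PySem.List.pyGetD (PySem.List.pyGetD grid (row : Int) []) col 0
    [(row : Int) - 1, (row : Int), (row : Int) + 1].foldl (fun acc nr =>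
      if 0 ≤ nr ∧ nr < (m : Int) ∧
         PySem.List.pyGetD (PySem.List.pyGetD grid nr []) (col + 1) 0 > currentVal
      then max acc (1 + PySem.List.pyGetD prev nr 0) else acc) 0)

def maxMovesOptimizedDP (grid : List (List Int)) : Int :=
  let m := grid.length
  let n := (PySem.List.pyGetD grid 0 []).length
  let prev := (PySem.List.pyRange ((n : Int) - 2) (-1) (-1)).foldl (pvAStep grid m)
      (List.replicate m (0 : Int))
  (PySem.List.max? prev (fun x => x)).getD 0

-- ===== PORT B =====
-- cols = [[row[c] for row in grid] for c in range(n)]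
def pvCols (grid : List (List Int)) (n : Nat) : List (List Int) :=
  (List.range n).map (fun (c : Nat) => grid.map (fun row => PySem.List.pyGetD row (c : Int) 0))

-- solve(cs): structural recursion over the column list
def pvSolve (m : Nat) : List (List Int) → List Int
  | [] => List.replicate m 0
  | [_] => List.replicate m 0
  | cur :: nxt :: rest =>
    let r := pvSolve m (nxt :: rest)
    (List.range m).map (fun (i : Nat) =>
      let cands := ([(i : Int) - 1, (i : Int), (i : Int) + 1].filter (fun j =>
          decide (0 ≤ j ∧ j < (m : Int) ∧
            PySem.List.pyGetD nxt j 0 > PySem.List.pyGetD cur (i : Int) 0))).map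
        (fun j => 1 + PySem.List.pyGetD r j 0)
      (PySem.List.max? cands (fun x => x)).getD 0)

def maxMovesOptimizedDP_alt (grid : List (List Int)) : Int :=
  let m := grid.length
  let n := (PySem.List.pyGetD grid 0 []).length
  (PySem.List.max? (pvSolve m (pvCols grid n)) (fun x => x)).getD 0

-- ===== PRECONDITION & SPEC =====
-- Pre_ excludes the empty grid (both Pythons raise IndexError on grid[0]) and ragged grids
-- with a row shorter than the first row: there B's eager transpose always raises IndexError,
-- while A's lazy indexing raises on most of them but happens to return on some (e.g. n == 1).
def Pre_maxMovesOptimizedDP (grid : List (List Int)) : Prop :=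
  grid ≠ [] ∧ ∀ r ∈ grid, grid.headI.length ≤ r.length
instance (grid : List (List Int)) : Decidable (Pre_maxMovesOptimizedDP grid) := by
  unfold Pre_maxMovesOptimizedDP; infer_instance
def pvWitness_maxMovesOptimizedDP : List (List Int) := [[1, 2], [3, 4]]

def Spec_maxMovesOptimizedDP (grid : List (List Int)) (out : Int) : Prop := out = maxMovesOptimizedDP_alt grid
instance (grid : List (List Int)) (out : Int) : Decidable (Spec_maxMovesOptimizedDP grid out) := by unfold Spec_maxMovesOptimizedDP; infer_instance

-- ===== CLAIM (what is proved, stated in full; the proofs are below) =====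
def Claim_equal_maxMovesOptimizedDP : Prop := ∀ (grid : List (List Int)), Dom_maxMovesOptimizedDP grid → Pre_maxMovesOptimizedDP grid → Spec_maxMovesOptimizedDP grid (maxMovesOptimizedDP grid)

-- ===== LEMMAS AND PROOFS =====

theorem length_pvSolve (m : Nat) (cs : List (List Int)) : (pvSolve m cs).length = m := by
  match cs with
  | [] => simp [pvSolve]
  | [_] => simp [pvSolve]
  | cur :: nxt :: rest => simp [pvSolve]

theorem nonneg_pvSolve (m : Nat) (cs : List (List Int)) :
    ∀ x ∈ pvSolve m cs, 0 ≤ x := by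
  induction cs with
  | nil => simp [pvSolve]
  | cons c rest ih =>
    match rest with
    | [] => simp [pvSolve]
    | nxt :: rest' =>
      intro x hx
      simp only [pvSolve, List.mem_map] at hx
      obtain ⟨i, hi, rfl⟩ := hx
      cases hmax : PySem.List.max? (([(i : Int) - 1, (i : Int), (i : Int) + 1].filter (fun j =>
          decide (0 ≤ j ∧ j < (m : Int) ∧
            PySem.List.pyGetD nxt j 0 > PySem.List.pyGetD c (i : Int) 0))).map
        (fun j => 1 + PySem.List.pyGetD (pvSolve m (nxt :: rest')) j 0)) (fun x => x) with
      | none => simp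
      | some v =>
        simp only [Option.getD_some]
        have hv := PySem.List.max?_mem hmax
        simp only [List.mem_map, List.mem_filter, decide_eq_true_eq] at hv
        obtain ⟨j, ⟨hjmem, hj0, hjm, _⟩, rfl⟩ := hv
        have hrange : j < ((pvSolve m (nxt :: rest')).length : Int) := by
          rw [length_pvSolve]; exact hjm
        rw [PySem.List.pyGetD_eq_getElem (xs := pvSolve m (nxt :: rest')) (d := 0) hj0 hrange]
        have hlt : j.toNat < (pvSolve m (nxt :: rest')).length := by
          rw [length_pvSolve]; omega
        have := ih _ (List.getElem_mem hlt)
        omega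

theorem pv_foldl_step_eq (P : Int → Prop) [DecidablePred P] (g : Int → Int) :
    ∀ (l : List Int) (acc : Int),
      l.foldl (fun a nr => if P nr then max a (g nr) else a) acc
      = ((l.filter (fun j => decide (P j))).map g).foldl max acc := by
  intro l
  induction l with
  | nil => intro acc; rfl
  | cons a t ih =>
    intro acc
    by_cases h : P a <;> simp [h, ih]

theorem pv_maxD0 (L : List Int) (h : ∀ x ∈ L, 0 ≤ x) :
    (PySem.List.max? L (fun x => x)).getD 0 = L.foldl max 0 := by
  cases L with
  | nil => rfl
  | cons x t =>
    rw [PySem.List.max?_id_cons x t]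
    have hx : max 0 x = x := max_eq_right (h x (by simp))
    simp [hx]

theorem pvAStep_eq (grid : List (List Int)) (n j : Nat)
    (h : j + 1 < n) :
    pvAStep grid grid.length
      (pvSolve grid.length ((pvCols grid n).drop (j+1))) (j : Int)
    = pvSolve grid.length ((pvCols grid n).drop j) := by
  have hlen : (pvCols grid n).length = n := by simp [pvCols]
  have hj : j < (pvCols grid n).length := by omega
  have hj1 : j + 1 < (pvCols grid n).length := by omega
  have hdj : (pvCols grid n).drop j = (pvCols grid n)[j] :: (pvCols grid n).drop (j+1) :=
    (List.getElem_cons_drop hj).symm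
  have hdj1 : (pvCols grid n).drop (j+1) = (pvCols grid n)[j+1] :: (pvCols grid n).drop (j+2) :=
    (List.getElem_cons_drop hj1).symm
  have hcj : (pvCols grid n)[j] = grid.map (fun row => PySem.List.pyGetD row (j : Int) 0) := by
    simp only [pvCols, List.getElem_map, List.getElem_range]
  have hcj1 : (pvCols grid n)[j+1] = grid.map (fun row => PySem.List.pyGetD row ((j : Int) + 1) 0) := by
    simp only [pvCols, List.getElem_map, List.getElem_range]
    norm_cast
  rw [hdj, hdj1, hcj, hcj1]
  apply List.map_congr_left
  intro i hi
  simp only [List.mem_range] at hi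
  show ([(i : Int) - 1, (i : Int), (i : Int) + 1].foldl (fun acc nr =>
      if 0 ≤ nr ∧ nr < (grid.length : Int) ∧
         PySem.List.pyGetD (PySem.List.pyGetD grid nr []) ((j : Int) + 1) 0 >
           PySem.List.pyGetD (PySem.List.pyGetD grid (i : Int) []) (j : Int) 0
      then max acc (1 + PySem.List.pyGetD (pvSolve grid.length
        ((grid.map (fun row => PySem.List.pyGetD row ((j : Int) + 1) 0)) :: (pvCols grid n).drop (j+2))) nr 0)
      else acc) 0)
    = (PySem.List.max? (([(i : Int) - 1, (i : Int), (i : Int) + 1].filter (fun jj =>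
        decide (0 ≤ jj ∧ jj < (grid.length : Int) ∧
          PySem.List.pyGetD (grid.map (fun row => PySem.List.pyGetD row ((j : Int) + 1) 0)) jj 0 >
            PySem.List.pyGetD (grid.map (fun row => PySem.List.pyGetD row (j : Int) 0)) (i : Int) 0))).map
      (fun jj => 1 + PySem.List.pyGetD (pvSolve grid.length
        ((grid.map (fun row => PySem.List.pyGetD row ((j : Int) + 1) 0)) :: (pvCols grid n).drop (j+2))) jj 0))
      (fun x => x)).getD 0
  have hcurv : PySem.List.pyGetD (grid.map (fun row => PySem.List.pyGetD row (j : Int) 0)) (i : Int) 0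
      = PySem.List.pyGetD (PySem.List.pyGetD grid (i : Int) []) (j : Int) 0 := by
    simp only [PySem.List.pyGetD_natCast]
    rw [List.getD_eq_getElem (hn := by simpa using hi),
        List.getD_eq_getElem (hn := hi), List.getElem_map]
  have hnxtv : ∀ nr : Int, 0 ≤ nr → nr < (grid.length : Int) →
      PySem.List.pyGetD (grid.map (fun row => PySem.List.pyGetD row ((j : Int) + 1) 0)) nr 0
      = PySem.List.pyGetD (PySem.List.pyGetD grid nr []) ((j : Int) + 1) 0 := by
    intro nr h0 hm
    have hlt : nr < ((grid.map (fun row => PySem.List.pyGetD row ((j : Int) + 1) 0)).length : Int) := by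
      simpa using hm
    rw [PySem.List.pyGetD_eq_getElem (xs := grid.map (fun row => PySem.List.pyGetD row ((j : Int) + 1) 0)) (d := 0) h0 hlt,
        PySem.List.pyGetD_eq_getElem (xs := grid) (d := []) h0 (by simpa using hm)]
    simp
  have hfc : ([(i : Int) - 1, (i : Int), (i : Int) + 1].filter (fun jj =>
        decide (0 ≤ jj ∧ jj < (grid.length : Int) ∧
          PySem.List.pyGetD (grid.map (fun row => PySem.List.pyGetD row ((j : Int) + 1) 0)) jj 0 >
            PySem.List.pyGetD (grid.map (fun row => PySem.List.pyGetD row (j : Int) 0)) (i : Int) 0)))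
      = ([(i : Int) - 1, (i : Int), (i : Int) + 1].filter (fun jj =>
        decide (0 ≤ jj ∧ jj < (grid.length : Int) ∧
          PySem.List.pyGetD (PySem.List.pyGetD grid jj []) ((j : Int) + 1) 0
            > PySem.List.pyGetD (PySem.List.pyGetD grid (i : Int) []) (j : Int) 0))) := by
    apply List.filter_congr
    intro nr _
    apply decide_eq_decide.mpr
    constructor
    · rintro ⟨h0, hm, hgt⟩
      exact ⟨h0, hm, by rw [← hnxtv nr h0 hm, ← hcurv]; exact hgt⟩
    · rintro ⟨h0, hm, hgt⟩
      exact ⟨h0, hm, by rw [hnxtv nr h0 hm, hcurv]; exact hgt⟩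
  rw [hfc, pv_maxD0, ← pv_foldl_step_eq (fun nr => 0 ≤ nr ∧ nr < (grid.length : Int) ∧
      PySem.List.pyGetD (PySem.List.pyGetD grid nr []) ((j : Int) + 1) 0
        > PySem.List.pyGetD (PySem.List.pyGetD grid (i : Int) []) (j : Int) 0)]
  intro x hx
  simp only [List.mem_map, List.mem_filter, decide_eq_true_eq] at hx
  obtain ⟨jj, ⟨_, h0, hm, _⟩, rfl⟩ := hx
  have hrange : jj < (((pvSolve grid.length
      ((grid.map (fun row => PySem.List.pyGetD row ((j : Int) + 1) 0)) :: (pvCols grid n).drop (j+2))).length : Int)) := by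
    rw [length_pvSolve]; exact hm
  rw [PySem.List.pyGetD_eq_getElem (xs := pvSolve grid.length
      ((grid.map (fun row => PySem.List.pyGetD row ((j : Int) + 1) 0)) :: (pvCols grid n).drop (j+2))) (d := 0) h0 hrange]
  have hlt : jj.toNat < (pvSolve grid.length
      ((grid.map (fun row => PySem.List.pyGetD row ((j : Int) + 1) 0)) :: (pvCols grid n).drop (j+2))).length := by
    rw [length_pvSolve]; omega
  have := nonneg_pvSolve grid.length _ _ (List.getElem_mem hlt)
  omega

theorem pv_foldA (grid : List (List Int)) (n : Nat) :
    ∀ j : Nat, j + 1 ≤ n →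
    (PySem.List.pyRange ((j : Int) - 1) (-1) (-1)).foldl (pvAStep grid grid.length)
      (pvSolve grid.length ((pvCols grid n).drop j))
    = pvSolve grid.length (pvCols grid n) := by
  intro j
  induction j with
  | zero =>
    intro _
    rw [PySem.List.pyRange_neg_one_eq_nil (by omega)]
    simp
  | succ j ih =>
    intro h
    have hcast : ((j+1 : Nat) : Int) - 1 = (j : Int) := by push_cast; ring
    rw [hcast, PySem.List.pyRange_neg_one_cons (by omega)]
    simp only [List.foldl_cons]
    rw [pvAStep_eq grid n j (by omega)]
    exact ih (by omega)

theorem pv_fold_total (grid : List (List Int)) (n : Nat) :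
    (PySem.List.pyRange ((n : Int) - 2) (-1) (-1)).foldl (pvAStep grid grid.length)
      (List.replicate grid.length 0)
    = pvSolve grid.length (pvCols grid n) := by
  cases n with
  | zero =>
    rw [PySem.List.pyRange_neg_one_eq_nil (by omega)]
    simp [pvCols, pvSolve]
  | succ k =>
    have hlen : (pvCols grid (k+1)).length = k+1 := by simp [pvCols]
    have hk : k < (pvCols grid (k+1)).length := by omega
    have hd : (pvCols grid (k+1)).drop k = [(pvCols grid (k+1))[k]'hk] := by
      rw [← List.getElem_cons_drop hk]
      have : (pvCols grid (k+1)).drop (k+1) = [] := by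
        apply List.drop_eq_nil_of_le; omega
      rw [this]
    have hinit : List.replicate grid.length (0:Int)
        = pvSolve grid.length ((pvCols grid (k+1)).drop k) := by
      rw [hd]; simp [pvSolve]
    have hcast : ((k+1 : Nat) : Int) - 2 = (k : Int) - 1 := by push_cast; ring
    rw [hcast, hinit]
    exact pv_foldA grid (k+1) k (by omega)

-- ===== VERDICT (by name: the statement is the Claim_ definition above) =====
theorem maxMovesOptimizedDP_spec : Claim_equal_maxMovesOptimizedDP := by
  intro grid _ _
  unfold Spec_maxMovesOptimizedDP
  simp only [maxMovesOptimizedDP, maxMovesOptimizedDP_alt]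
  rw [pv_fold_total]
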